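-- pv_equiv track=rewrite | github.com/AlexLup06/BA_Code | python/data_evaluation/format_client_data.py | remove_multiple_occurrences
-- ===== SOURCE A (Python) =====
-- def remove_multiple_occurrences(arr1, arr2):
--     seen = {}
--     result1 = []
--     result2 = []
--
--     for i, (item1, item2) in enumerate(zip(reversed(arr1), reversed(arr2))):
--         if item1 not in seen:
--             seen[item1] = True
--             result1.append(item1)
--             result2.append(item2)
--
--     # Reverse the results to maintain the original order
--     result1.reverse()
--     result2.reverse()
--
--     return result1, result2
-- ===== SOURCE B (Python) =====
-- def remove_multiple_occurrences(arr1, arr2):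
--     # Work on the aligned tails (zip of reversals pairs the arrays from their ends),
--     # then keep each value only at its LAST index, found by a dict built in one
--     # forward pass -- two forward passes, no reversals.
--     n = min(len(arr1), len(arr2))
--     a1 = arr1[len(arr1) - n:]
--     a2 = arr2[len(arr2) - n:]
--     last = {}
--     for i, v in enumerate(a1):
--         last[v] = i
--     result1 = []
--     result2 = []
--     for i, (v, w) in enumerate(zip(a1, a2)):
--         if last[v] == i:
--             result1.append(v)
--             result2.append(w)
--     return result1, result2
-- ===== Notes on version B (the rewrite author's own statement) =====
-- stated objective: alternative
-- what changed: A scans the reversed zipped arrays keeping first occurrences in a seen-dict and reverses both results; B slices the aligned tails, builds a last-index dict in one forward pass and keeps each pair exactly at its value's last index in a second forward pass, with no reversals.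
import Mathlib
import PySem

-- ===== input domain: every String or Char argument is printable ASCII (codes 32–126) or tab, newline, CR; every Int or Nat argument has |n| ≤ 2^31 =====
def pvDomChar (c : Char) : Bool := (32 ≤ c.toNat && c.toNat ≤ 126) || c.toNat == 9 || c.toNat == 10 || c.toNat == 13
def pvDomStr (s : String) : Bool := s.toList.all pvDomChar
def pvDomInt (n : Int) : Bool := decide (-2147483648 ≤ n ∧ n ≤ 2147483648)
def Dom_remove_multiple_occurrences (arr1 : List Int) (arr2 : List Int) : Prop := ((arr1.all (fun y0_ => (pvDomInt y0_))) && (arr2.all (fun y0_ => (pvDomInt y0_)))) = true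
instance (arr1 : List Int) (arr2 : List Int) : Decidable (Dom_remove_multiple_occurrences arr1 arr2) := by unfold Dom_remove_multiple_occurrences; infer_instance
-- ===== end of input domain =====

-- B replaces A's reverse-scan-with-seen-dict (keep first occurrence of the reversed
-- tails, then reverse back) by two forward passes over the aligned tail slices: a
-- last-index dict, then keeping each pair exactly at its value's last index (objective:
-- alternative, same cost).


-- ===== PORT A =====
-- 'for item1, item2 in zip(reversed(arr1), reversed(arr2)): if item1 not in seen: …'
def remove_multiple_occurrences (arr1 : List Int) (arr2 : List Int) : List Int × List Int :=
  let st := (arr1.reverse.zip arr2.reverse).foldl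
      (fun (st : PySem.Dict Int Bool × List Int × List Int) p =>
        if !(st.1.contains p.1) then
          (st.1.insert p.1 true, st.2.1 ++ [p.1], st.2.2 ++ [p.2])
        else st)
      (PySem.Dict.empty, [], [])
  (st.2.1.reverse, st.2.2.reverse)

-- ===== PORT B =====
def remove_multiple_occurrences_alt (arr1 : List Int) (arr2 : List Int) : List Int × List Int :=
  let n : Nat := min arr1.length arr2.length
  let a1 := PySem.List.slice arr1 (some ((arr1.length - n : Nat) : Int)) none
  let a2 := PySem.List.slice arr2 (some ((arr2.length - n : Nat) : Int)) none
  let last := (PySem.List.enumerate a1 0).foldl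
      (fun (d : PySem.Dict Int Int) p => d.insert p.2 p.1) PySem.Dict.empty
  -- 'last[v] == i': the key v is always present, so the lookup never raises;
  -- ported as get? compared with some i (exact here)
  (PySem.List.enumerate (a1.zip a2) 0).foldl
      (fun (r : List Int × List Int) q =>
        if last.get? q.2.1 == some q.1 then (r.1 ++ [q.2.1], r.2 ++ [q.2.2]) else r)
      ([], [])

-- ===== PRECONDITION & SPEC =====
def Spec_remove_multiple_occurrences (arr1 : List Int) (arr2 : List Int) (out : List Int × List Int) : Prop := out = remove_multiple_occurrences_alt arr1 arr2
instance (arr1 : List Int) (arr2 : List Int) (out : List Int × List Int) : Decidable (Spec_remove_multiple_occurrences arr1 arr2 out) := by unfold Spec_remove_multiple_occurrences; infer_instance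

-- ===== CLAIM (what is proved, stated in full; the proofs are below) =====
def Claim_equal_remove_multiple_occurrences : Prop := ∀ (arr1 : List Int) (arr2 : List Int), Dom_remove_multiple_occurrences arr1 arr2 → Spec_remove_multiple_occurrences arr1 arr2 (remove_multiple_occurrences arr1 arr2)

-- ===== LEMMAS AND PROOFS =====

-- keep the FIRST occurrence of each key not in s (A's seen-loop, as a recursion)
def keepFirst : List (Int × Int) → List Int → List (Int × Int)
  | [], _ => []
  | p :: t, s => if p.1 ∈ s then keepFirst t s else p :: keepFirst t (p.1 :: s)

-- B's first pass: the last-index dict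
def lastD (a : List Int) : PySem.Dict Int Int :=
  (PySem.List.enumerate a 0).foldl
    (fun (d : PySem.Dict Int Int) p => d.insert p.2 p.1) PySem.Dict.empty

lemma keepFirst_congr (l : List (Int × Int)) (s s' : List Int)
    (h : ∀ v, v ∈ s ↔ v ∈ s') : keepFirst l s = keepFirst l s' := by
  induction l generalizing s s' with
  | nil => rfl
  | cons p t ih =>
    simp only [keepFirst]
    by_cases hp : p.1 ∈ s
    · rw [if_pos hp, if_pos ((h p.1).mp hp), ih s s' h]
    · rw [if_neg hp, if_neg (fun hx => hp ((h p.1).mpr hx))]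
      rw [ih (p.1 :: s) (p.1 :: s') (by intro v; simp [h v])]

-- A's loop, characterised: the two accumulators collect keepFirst
lemma foldA (l : List (Int × Int)) (d : PySem.Dict Int Bool) (s : List Int)
    (r1 r2 : List Int) (hd : ∀ v, d.contains v = decide (v ∈ s)) :
    (l.foldl
      (fun (st : PySem.Dict Int Bool × List Int × List Int) p =>
        if !(st.1.contains p.1) then
          (st.1.insert p.1 true, st.2.1 ++ [p.1], st.2.2 ++ [p.2])
        else st)
      (d, r1, r2)).2
      = (r1 ++ (keepFirst l s).map (·.1), r2 ++ (keepFirst l s).map (·.2)) := by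
  induction l generalizing d s r1 r2 with
  | nil => simp [keepFirst]
  | cons p t ih =>
    simp only [List.foldl_cons, keepFirst, hd p.1]
    by_cases hp : p.1 ∈ s
    · simp only [hp, decide_true, Bool.not_true, Bool.false_eq_true, if_false]
      exact ih d s r1 r2 hd
    · simp only [hp, decide_false, Bool.not_false, if_true]
      rw [ih (d.insert p.1 true) (p.1 :: s) (r1 ++ [p.1]) (r2 ++ [p.2])
        (by intro v; rw [PySem.Dict.contains_insert, hd v]; by_cases hv : v = p.1 <;> simp [hv])]
      simp

lemma lastD_snoc (a : List Int) (x : Int) :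
    lastD (a ++ [x]) = (lastD a).insert x (a.length : Int) := by
  simp [lastD, PySem.List.enumerate_append, List.foldl_append]

-- B's second pass, characterised: a filter of the enumeration
lemma foldB (l : List (Int × (Int × Int))) (c : Int × (Int × Int) → Bool)
    (r1 r2 : List Int) :
    (l.foldl
      (fun (r : List Int × List Int) q =>
        if c q then (r.1 ++ [q.2.1], r.2 ++ [q.2.2]) else r) (r1, r2))
      = (r1 ++ (l.filter c).map (·.2.1), r2 ++ (l.filter c).map (·.2.2)) := by
  induction l generalizing r1 r2 with
  | nil => simp
  | cons q t ih =>
    simp only [List.foldl_cons, List.filter_cons]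
    by_cases hq : c q = true
    · rw [if_pos hq, hq, ih]; simp
    · rw [if_neg hq]; simp only [hq]; rw [ih]; simp

-- the core: first-occurrences of the reversed list, reversed back,
-- = the pairs kept at their value's last index
lemma core (q : List (Int × Int)) (s : List Int) :
    (keepFirst q.reverse s).reverse
      = ((PySem.List.enumerate q 0).filter
          (fun e => decide (e.2.1 ∉ s) && ((lastD (q.map Prod.fst)).get? e.2.1 == some e.1))).map (·.2) := by
  induction q using List.reverseRecOn generalizing s with
  | nil => simp [keepFirst, PySem.List.enumerate, lastD]
  | append_singleton q x ih =>
    have hmapfst : (q ++ [x]).map Prod.fst = q.map Prod.fst ++ [x.1] := by simp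
    have hlen : (q.map Prod.fst).length = q.length := by simp
    have hdict : lastD ((q ++ [x]).map Prod.fst)
        = (lastD (q.map Prod.fst)).insert x.1 (q.length : Int) := by
      rw [hmapfst, lastD_snoc, hlen]
    have henum : PySem.List.enumerate (q ++ [x]) 0
        = PySem.List.enumerate q 0 ++ [((q.length : Int), x)] := by
      rw [PySem.List.enumerate_append]; simp [PySem.List.enumerate]
    -- the filter over the old part with the new dict = old dict and s extended by x.1
    have hfc : (PySem.List.enumerate q 0).filter
          (fun e => decide (e.2.1 ∉ s) && (((lastD (q.map Prod.fst)).insert x.1 (q.length : Int)).get? e.2.1 == some e.1))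
        = (PySem.List.enumerate q 0).filter
          (fun e => decide (e.2.1 ∉ x.1 :: s) && ((lastD (q.map Prod.fst)).get? e.2.1 == some e.1)) := by
      apply List.filter_congr
      intro e he
      rcases (PySem.List.mem_enumerate_iff _ _ _).mp he with ⟨k, hk, rfl⟩
      simp only [zero_add]
      by_cases hx : (q[k]).1 = x.1
      · have h1 : ((lastD (q.map Prod.fst)).insert x.1 (q.length : Int)).get? (q[k]).1
            = some (q.length : Int) := by
          rw [hx, PySem.Dict.get?_insert]; simp
        rw [h1]
        have hne : ((q.length : Int) == (k : Int)) = false := by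
          simp only [beq_eq_false_iff_ne, ne_eq]
          omega
        simp [hx, hne]
      · have h1 : ((lastD (q.map Prod.fst)).insert x.1 (q.length : Int)).get? (q[k]).1
            = (lastD (q.map Prod.fst)).get? (q[k]).1 := by
          rw [PySem.Dict.get?_insert]; simp [hx]
        rw [h1]
        simp [hx]
    rw [henum, List.filter_append, List.map_append, hdict, hfc]
    have hsing : ([((q.length : Int), x)].filter
          (fun e => decide (e.2.1 ∉ s) && (((lastD (q.map Prod.fst)).insert x.1 (q.length : Int)).get? e.2.1 == some e.1)))
        = if x.1 ∈ s then [] else [((q.length : Int), x)] := by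
      simp only [List.filter_cons, List.filter_nil]
      rw [PySem.Dict.get?_insert]
      by_cases hx : x.1 ∈ s <;> simp [hx]
    rw [hsing]
    have hrev : (q ++ [x]).reverse = x :: q.reverse := by simp
    rw [hrev]
    simp only [keepFirst]
    by_cases hx : x.1 ∈ s
    · rw [if_pos hx, if_pos hx,
        keepFirst_congr q.reverse s (x.1 :: s) (by intro v; by_cases hv : v = x.1 <;> simp [hv, hx])]
      rw [ih (x.1 :: s)]; simp
    · rw [if_neg hx, if_neg hx]
      simp only [List.reverse_cons]
      rw [ih (x.1 :: s)]
      simp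

lemma zip_rev (u v : List Int) (h : u.length = v.length) :
    u.reverse.zip v.reverse = (u.zip v).reverse := by
  induction u generalizing v with
  | nil => cases v with
    | nil => rfl
    | cons _ _ => simp at h
  | cons c u' ih => cases v with
    | nil => simp at h
    | cons d v' =>
      simp only [List.length_cons, Nat.add_right_cancel_iff] at h
      simp only [List.reverse_cons, List.zip_cons_cons, List.reverse_cons]
      rw [List.zip_append (by simp [h]), ih v' h]
      simp

lemma zip_truncate (u v : List Int) :
    u.zip v = (u.take (min u.length v.length)).zip (v.take (min u.length v.length)) := by
  induction u generalizing v with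
  | nil => simp
  | cons c u' ih => cases v with
    | nil => simp
    | cons d v' =>
      simp only [List.length_cons, List.zip_cons_cons]
      have : min (u'.length + 1) (v'.length + 1) = min u'.length v'.length + 1 := by omega
      rw [this]
      simp [List.take_succ_cons, ih v']

-- ===== VERDICT (by name: the statement is the Claim_ definition above) =====
theorem remove_multiple_occurrences_spec : Claim_equal_remove_multiple_occurrences := by
  intro arr1 arr2 _
  unfold Spec_remove_multiple_occurrences
  simp only [remove_multiple_occurrences, remove_multiple_occurrences_alt]
  set n : Nat := min arr1.length arr2.length with hn
  have hn1 : n ≤ arr1.length := by omega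
  have hn2 : n ≤ arr2.length := by omega
  rw [PySem.List.slice_from_natCast, PySem.List.slice_from_natCast]
  set a1 := arr1.drop (arr1.length - n) with ha1
  set a2 := arr2.drop (arr2.length - n) with ha2
  have hl1 : a1.length = n := by simp [ha1]; omega
  have hl2 : a2.length = n := by simp [ha2]; omega
  have hzip : arr1.reverse.zip arr2.reverse = (a1.zip a2).reverse := by
    rw [zip_truncate arr1.reverse arr2.reverse]
    simp only [List.length_reverse]
    rw [← hn, List.take_reverse, List.take_reverse, ← ha1, ← ha2]
    exact zip_rev a1 a2 (by rw [hl1, hl2])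
  have hfst : (a1.zip a2).map Prod.fst = a1 :=
    List.map_fst_zip (by rw [hl1, hl2])
  rw [hzip,
    foldA ((a1.zip a2).reverse) PySem.Dict.empty [] [] []
      (by intro v; simp [PySem.Dict.contains_empty]),
    foldB]
  have hkey : (List.foldl (fun (d : PySem.Dict Int Int) p => d.insert p.2 p.1)
      PySem.Dict.empty (PySem.List.enumerate a1 0)) = lastD ((a1.zip a2).map Prod.fst) := by
    rw [hfst]; rfl
  rw [hkey]
  have hcore := core (a1.zip a2) []
  simp only [List.not_mem_nil, not_false_iff, decide_true, Bool.true_and] at hcore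
  simp only [List.nil_append, Prod.mk.injEq]
  constructor
  · rw [← List.map_reverse, hcore]; simp
  · rw [← List.map_reverse, hcore]; simp
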